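-- pv_equiv track=rewrite | github.com/gbusch/AdventOfCode | 2022/day10.py | get_signal_strengths
-- ===== SOURCE A (Python) =====
-- def get_signal_strengths(input_str):
--     x = [
--         1,
--     ]
--     for i, line in enumerate(input_str.splitlines()):
--         x.append(x[-1])
--         if line.startswith("addx"):
--             _, step = line.split()
--             x.append(x[-1] + int(step))
--     return x
-- ===== SOURCE B (Python) =====
-- def get_signal_strengths(input_str):
--     # Pass 1: a flat table of per-cycle register deltas (noop -> [0], addx v -> [0, v]).
--     deltas = []
--     for line in input_str.splitlines():
--         deltas.append(0)
--         if line.startswith("addx"):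
--             _, step = line.split()
--             deltas.append(int(step))
--     # Pass 2: prefix sums of the deltas starting from 1.
--     n = 1
--     out = [1]
--     for d in deltas:
--         n += d
--         out.append(n)
--     return out
-- ===== Notes on version B (the rewrite author's own statement) =====
-- stated objective: alternative
-- what changed: B replaces A's single loop that threads the register history through x[-1] reads and conditional double-appends by a two-pass decomposition: first build a flat per-cycle delta table, then produce the register sequence as a prefix-sum scan over it.
import Mathlib
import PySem

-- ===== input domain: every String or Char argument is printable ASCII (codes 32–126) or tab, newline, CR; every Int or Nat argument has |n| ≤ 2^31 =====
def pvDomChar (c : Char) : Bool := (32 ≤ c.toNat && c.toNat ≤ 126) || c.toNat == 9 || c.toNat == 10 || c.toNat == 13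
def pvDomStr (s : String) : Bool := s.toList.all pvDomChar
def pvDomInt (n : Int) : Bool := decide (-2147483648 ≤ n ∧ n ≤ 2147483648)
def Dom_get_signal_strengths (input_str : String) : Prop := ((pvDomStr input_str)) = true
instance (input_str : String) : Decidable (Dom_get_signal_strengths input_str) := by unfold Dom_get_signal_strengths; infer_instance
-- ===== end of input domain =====

-- B replaces A's threaded-accumulator loop by a two-pass decomposition (per-cycle delta
-- table, then a prefix-sum scan); same cost, no speed claim.


-- ===== PORT A =====
-- A's loop body: append x[-1]; on an addx line also append x[-1] + int(step).
-- Where Python raises ValueError (split ≠ 2 tokens, or int(step) fails) the port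
-- leaves x unchanged; Pre_ excludes exactly those inputs.
def pvStepA (x : List Int) (line : String) : List Int :=
  let x1 := x ++ [PySem.List.pyGetD x (-1) 0]
  if PySem.Str.startswith line "addx" then
    match PySem.Str.split₀ line with
    | [_, step] =>
      match PySem.Int.ofStr? step with
      | some n => x1 ++ [PySem.List.pyGetD x1 (-1) 0 + n]
      | none => x1
    | _ => x1
  else x1

def get_signal_strengths (input_str : String) : List Int :=
  (PySem.Str.splitlines input_str).foldl pvStepA [1]

-- ===== PORT B =====
-- B pass 1 loop body: append 0; on an addx line also append int(step) (same raise cases).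
def pvStepD (ds : List Int) (line : String) : List Int :=
  let ds1 := ds ++ [0]
  if PySem.Str.startswith line "addx" then
    match PySem.Str.split₀ line with
    | [_, step] =>
      match PySem.Int.ofStr? step with
      | some n => ds1 ++ [n]
      | none => ds1
    | _ => ds1
  else ds1

-- B pass 2 loop body: running sum n, output list out.
def pvScanStep (p : Int × List Int) (d : Int) : Int × List Int :=
  (p.1 + d, p.2 ++ [p.1 + d])

def get_signal_strengths_alt (input_str : String) : List Int :=
  let deltas := (PySem.Str.splitlines input_str).foldl pvStepD []
  (deltas.foldl pvScanStep (1, [1])).2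

-- ===== PRECONDITION & SPEC =====
-- Pre_ excludes exactly the inputs on which Python A raises ValueError: a line starting
-- with "addx" whose split() does not yield exactly two tokens, or whose second token
-- int() rejects. (B raises identically there.)
def Pre_get_signal_strengths (input_str : String) : Prop :=
  ((PySem.Str.splitlines input_str).all (fun line =>
    !PySem.Str.startswith line "addx" ||
    (match PySem.Str.split₀ line with
     | [_, step] => (PySem.Int.ofStr? step).isSome
     | _ => false))) = true
instance (input_str : String) : Decidable (Pre_get_signal_strengths input_str) := by
  unfold Pre_get_signal_strengths; infer_instance

def pvWitness_get_signal_strengths : String := "noop\naddx 3\naddx -5"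

def Spec_get_signal_strengths (input_str : String) (out : List Int) : Prop :=
  out = get_signal_strengths_alt input_str
instance (input_str : String) (out : List Int) : Decidable (Spec_get_signal_strengths input_str out) := by
  unfold Spec_get_signal_strengths; infer_instance

-- ===== CLAIM (what is proved, stated in full; the proofs are below) =====
def Claim_equal_get_signal_strengths : Prop :=
  ∀ (input_str : String), Dom_get_signal_strengths input_str →
    Pre_get_signal_strengths input_str →
    Spec_get_signal_strengths input_str (get_signal_strengths input_str)

-- ===== LEMMAS AND PROOFS =====

-- the per-line delta block B's pass 1 appends for one line
def pvDelta (line : String) : List Int :=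
  0 :: (if PySem.Str.startswith line "addx" then
          match PySem.Str.split₀ line with
          | [_, step] =>
            match PySem.Int.ofStr? step with
            | some n => [n]
            | none => []
          | _ => []
        else [])

lemma pvStepD_eq (ds : List Int) (line : String) :
    pvStepD ds line = ds ++ pvDelta line := by
  unfold pvStepD pvDelta
  split
  · split
    · split <;> simp
    · simp
  · simp

lemma foldl_pvStepD (lines : List String) (ds : List Int) :
    lines.foldl pvStepD ds = ds ++ lines.flatMap pvDelta := by
  induction lines generalizing ds with
  | nil => simp
  | cons l ls ih => simp [List.foldl_cons, pvStepD_eq, ih]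

lemma pvGetD_append_two (xs : List Int) (a b : Int) :
    PySem.List.pyGetD (xs ++ [a, b]) (-1) 0 = b := by
  rw [show xs ++ [a, b] = (xs ++ [a]) ++ [b] by simp]
  exact PySem.List.pyGetD_neg_one_append_singleton _ _ _

-- one line of A's loop equals scanning its delta block
lemma pvStep_line (x : List Int) (line : String) (n : Int)
    (hn : PySem.List.pyGetD x (-1) 0 = n) :
    (pvDelta line).foldl pvScanStep (n, x) =
      (PySem.List.pyGetD (pvStepA x line) (-1) 0, pvStepA x line) := by
  unfold pvDelta pvStepA
  split
  · split
    · split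
      · simp [pvScanStep, hn, PySem.List.pyGetD_neg_one_append_singleton, pvGetD_append_two]
      · simp [pvScanStep, hn, PySem.List.pyGetD_neg_one_append_singleton]
    · simp [pvScanStep, hn, PySem.List.pyGetD_neg_one_append_singleton]
  · simp [pvScanStep, hn, PySem.List.pyGetD_neg_one_append_singleton]

-- main invariant: A's fold equals B's scan over the flat delta table
lemma pvMain (lines : List String) (x : List Int) (n : Int)
    (hn : PySem.List.pyGetD x (-1) 0 = n) :
    (lines.flatMap pvDelta).foldl pvScanStep (n, x) =
      (PySem.List.pyGetD (lines.foldl pvStepA x) (-1) 0, lines.foldl pvStepA x) := by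
  induction lines generalizing x n with
  | nil => simp [hn]
  | cons l ls ih =>
    rw [List.flatMap_cons, List.foldl_append, pvStep_line x l n hn,
        List.foldl_cons, ih _ _ rfl]

-- ===== VERDICT (by name: the statement is the Claim_ definition above) =====
theorem get_signal_strengths_spec : Claim_equal_get_signal_strengths := by
  intro s _ _
  unfold Spec_get_signal_strengths get_signal_strengths get_signal_strengths_alt
  simp only [foldl_pvStepD, List.nil_append]
  rw [pvMain _ [1] 1 (by decide)]
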